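-- pv_equiv track=rewrite | github.com/NetSys/kappa | examples/word_count/word_count.py | make_mapper_ranges
-- ===== SOURCE A (Python) =====
-- def make_mapper_ranges(num_chunks, num_mappers):
--     """kappa:ignore"""
--     base = num_chunks // num_mappers
--     extras = num_chunks % num_mappers
--
--     mapper_ranges = []
--     start = 0
--     for i in range(num_mappers):
--         chunks = base
--         if i < extras:
--             chunks += 1
--         mapper_ranges.append((start, start + chunks))
--         start += chunks
--
--     assert start == num_chunks
--     return mapper_ranges
-- ===== SOURCE B (Python) =====
-- def make_mapper_ranges(num_chunks, num_mappers):
--     """kappa:ignore"""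
--     base = num_chunks // num_mappers
--     extras = num_chunks % num_mappers
--     return [(i * base + min(i, extras), (i + 1) * base + min(i + 1, extras))
--             for i in range(num_mappers)]
-- ===== Notes on version B (the rewrite author's own statement) =====
-- stated objective: simpler
-- what changed: Each mapper's (start, end) is derived by a closed form from its index i (i*base + min(i, extras)), replacing the running start accumulator, the per-iteration chunks branch, and the final assertion.
import Mathlib
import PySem

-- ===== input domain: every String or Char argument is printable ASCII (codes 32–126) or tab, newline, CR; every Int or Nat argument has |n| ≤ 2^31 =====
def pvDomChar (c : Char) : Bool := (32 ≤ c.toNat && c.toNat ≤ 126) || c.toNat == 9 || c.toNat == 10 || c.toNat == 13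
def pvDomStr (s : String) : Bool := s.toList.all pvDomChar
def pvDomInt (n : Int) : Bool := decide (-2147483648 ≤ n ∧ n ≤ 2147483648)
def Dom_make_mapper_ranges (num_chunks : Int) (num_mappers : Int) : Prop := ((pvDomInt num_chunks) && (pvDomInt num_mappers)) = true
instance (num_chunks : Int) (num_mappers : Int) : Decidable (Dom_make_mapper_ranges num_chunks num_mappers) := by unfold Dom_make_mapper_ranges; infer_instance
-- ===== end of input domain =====

-- B derives each mapper's bounds by a closed form from its index instead of a running
-- start accumulator; return values agree on Pre_ (proved below); no mutation involved.

-- ===== PORT A =====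
def make_mapper_ranges (num_chunks : Int) (num_mappers : Int) : List (Int × Int) :=
  let base := PySem.Int.floordiv num_chunks num_mappers
  let extras := PySem.Int.mod num_chunks num_mappers
  let st := (PySem.List.pyRange 0 num_mappers 1).foldl
    (fun (acc : List (Int × Int) × Int) i =>
      let chunks := if i < extras then base + 1 else base
      (acc.1 ++ [(acc.2, acc.2 + chunks)], acc.2 + chunks)) ([], 0)
  -- the final 'assert start == num_chunks' always holds on Pre_ (excluded inputs raise)
  st.1

-- ===== PORT B =====
def make_mapper_ranges_alt (num_chunks : Int) (num_mappers : Int) : List (Int × Int) :=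
  let base := PySem.Int.floordiv num_chunks num_mappers
  let extras := PySem.Int.mod num_chunks num_mappers
  (PySem.List.pyRange 0 num_mappers 1).map
    (fun i => (i * base + min i extras, (i + 1) * base + min (i + 1) extras))

-- ===== PRECONDITION & SPEC =====
-- A raises ZeroDivisionError when num_mappers = 0, and AssertionError when
-- num_mappers < 0 and num_chunks ≠ 0 (the loop never runs, so start = 0 ≠ num_chunks);
-- Pre_ excludes exactly those inputs and nothing else.
def Pre_make_mapper_ranges (num_chunks : Int) (num_mappers : Int) : Prop :=
  0 < num_mappers ∨ (num_mappers < 0 ∧ num_chunks = 0)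
instance (num_chunks : Int) (num_mappers : Int) : Decidable (Pre_make_mapper_ranges num_chunks num_mappers) := by unfold Pre_make_mapper_ranges; infer_instance
def pvWitness_make_mapper_ranges : Int × Int := (10, 3)

def Spec_make_mapper_ranges (num_chunks : Int) (num_mappers : Int) (out : List (Int × Int)) : Prop := out = make_mapper_ranges_alt num_chunks num_mappers
instance (num_chunks : Int) (num_mappers : Int) (out : List (Int × Int)) : Decidable (Spec_make_mapper_ranges num_chunks num_mappers out) := by unfold Spec_make_mapper_ranges; infer_instance

-- ===== CLAIM (what is proved, stated in full; the proofs are below) =====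
def Claim_equal_make_mapper_ranges : Prop := ∀ (num_chunks : Int) (num_mappers : Int), Dom_make_mapper_ranges num_chunks num_mappers → Pre_make_mapper_ranges num_chunks num_mappers → Spec_make_mapper_ranges num_chunks num_mappers (make_mapper_ranges num_chunks num_mappers)

-- ===== LEMMAS AND PROOFS =====

-- loop invariant: after processing range(0, n), A's accumulator equals
-- (B's list over range(0, n), the closed-form start n*b + min n e)
theorem mmr_loop (b e : Int) (he : 0 ≤ e) (n : Nat) :
    ((PySem.List.pyRange 0 (n : Int) 1).foldl
      (fun (acc : List (Int × Int) × Int) i =>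
        let chunks := if i < e then b + 1 else b
        (acc.1 ++ [(acc.2, acc.2 + chunks)], acc.2 + chunks)) ([], 0))
    = ((PySem.List.pyRange 0 (n : Int) 1).map
        (fun i => (i * b + min i e, (i + 1) * b + min (i + 1) e)),
       (n : Int) * b + min (n : Int) e) := by
  induction n with
  | zero =>
    rw [PySem.List.pyRange_one_eq_nil (by norm_num)]
    simp; omega
  | succ n ih =>
    have hcast : ((n + 1 : Nat) : Int) = (n : Int) + 1 := by push_cast; ring
    rw [hcast, PySem.List.pyRange_one_succ_right (by positivity),
        List.foldl_append, List.map_append, ih]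
    have hb : ((n : Int) + 1) * b = (n : Int) * b + b := by ring
    have h1 : ((n : Int) * b + min (n : Int) e) + (if (n : Int) < e then b + 1 else b)
        = ((n : Int) + 1) * b + min ((n : Int) + 1) e := by
      rw [hb]; split_ifs with h <;> omega
    simp only [List.foldl_cons, List.foldl_nil, List.map_cons, List.map_nil, h1]

-- ===== VERDICT (by name: the statement is the Claim_ definition above) =====
theorem make_mapper_ranges_spec : Claim_equal_make_mapper_ranges := by
  intro c m _ hpre
  unfold Spec_make_mapper_ranges make_mapper_ranges make_mapper_ranges_alt
  rcases hpre with hm | ⟨hm, hc⟩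
  · have he : 0 ≤ PySem.Int.mod c m := by
      rw [PySem.Int.mod_eq_emod_of_pos hm]
      exact Int.emod_nonneg c (by omega)
    have hn : m = ((m.toNat : Nat) : Int) := by omega
    rw [hn] at he ⊢
    simp only [mmr_loop _ _ he]
  · rw [PySem.List.pyRange_one_eq_nil (by omega)]
    simp
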